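-- pv_equiv track=rewrite | github.com/dalf/hpack_nghttp2 | src/hpack/hpack.py | _dict_to_iterable
-- ===== SOURCE A (Python) =====
-- def _dict_to_iterable(header_dict):
--     """
--     This converts a dictionary to an iterable of two-tuples. This is a
--     HPACK-specific function because it pulls "special-headers" out first and
--     then emits them.
--     """
--     assert isinstance(header_dict, dict)
--     keys = sorted(
--         header_dict.keys(),
--         key=lambda k: not _to_bytes(k).startswith(b':')
--     )
--     for key in keys:
--         yield key, header_dict[key]
--
-- def _to_bytes(string):
--     """
--     Convert string to bytes.
--     """
--     if not isinstance(string, (str, bytes)):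
--         string = str(string)
--
--     return string if isinstance(string, bytes) else string.encode('utf-8')
-- ===== SOURCE B (Python) =====
-- def _dict_to_iterable(header_dict):
--     """
--     Same items as A, specials first: instead of sorting the keys, make two
--     sequential passes over the dict's items (specials, then the rest).
--     """
--     assert isinstance(header_dict, dict)
--     for key, value in header_dict.items():
--         if _to_bytes(key).startswith(b':'):
--             yield key, value
--     for key, value in header_dict.items():
--         if not _to_bytes(key).startswith(b':'):
--             yield key, value
--
--
-- def _to_bytes(string):
--     """
--     Convert string to bytes.
--     """
--     if not isinstance(string, (str, bytes)):
--         string = str(string)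
--
--     return string if isinstance(string, bytes) else string.encode('utf-8')
-- ===== Notes on version B (the rewrite author's own statement) =====
-- stated objective: simpler
-- what changed: Replaces the sort of the key list (stable sort on a boolean key, then per-key dict lookups) by two plain passes over the dict's items, yielding the special ':'-keys first and the rest second; no sort and no lookup.
import Mathlib
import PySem

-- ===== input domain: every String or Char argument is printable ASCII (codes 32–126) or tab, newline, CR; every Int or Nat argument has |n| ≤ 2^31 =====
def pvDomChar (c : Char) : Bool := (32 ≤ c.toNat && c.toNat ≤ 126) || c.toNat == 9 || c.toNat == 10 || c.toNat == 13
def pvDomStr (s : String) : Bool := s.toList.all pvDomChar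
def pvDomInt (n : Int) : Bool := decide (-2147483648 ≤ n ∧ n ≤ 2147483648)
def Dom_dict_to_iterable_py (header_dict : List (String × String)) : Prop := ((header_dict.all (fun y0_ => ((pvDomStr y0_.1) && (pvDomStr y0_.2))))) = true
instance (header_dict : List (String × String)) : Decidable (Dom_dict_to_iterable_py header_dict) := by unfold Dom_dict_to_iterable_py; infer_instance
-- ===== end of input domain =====

-- B replaces A's stable boolean-key sort + per-key dict lookup by two plain passes over the
-- items (specials first, then the rest): simpler, no sort and no lookup.


-- ===== PORT A =====
-- keys = sorted(header_dict.keys(), key=lambda k: not _to_bytes(k).startswith(b':'))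
-- for key in keys: yield key, header_dict[key]
-- (keys are strings, so _to_bytes(k).startswith(b':') is k.startswith(':');
--  header_dict[key] is a first-match lookup; key always comes from the dict's keys, so the
--  KeyError branch of [] is unreachable and getD's default never fires)
def dict_to_iterable_py (header_dict : List (String × String)) : List (String × String) :=
  let keys := PySem.List.sorted (header_dict.map Prod.fst)
      (fun k => !(PySem.Str.startswith k ":")) false
  keys.map (fun key => (key, (PySem.Dict.mk header_dict).getD key ""))

-- ===== PORT B =====
-- two sequential passes over the items: specials first, then the rest
def dict_to_iterable_py_alt (header_dict : List (String × String)) : List (String × String) :=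
  (header_dict.filter (fun p => PySem.Str.startswith p.1 ":"))
    ++ (header_dict.filter (fun p => !(PySem.Str.startswith p.1 ":")))

-- ===== PRECONDITION & SPEC =====
-- A Python dict cannot contain the same key twice; Pre_ excludes association lists with
-- duplicate keys, which represent no Python input (there A's port repeats the first value
-- for a repeated key while B's emits each stored pair).
def Pre_dict_to_iterable_py (header_dict : List (String × String)) : Prop :=
  (header_dict.map Prod.fst).Nodup
instance (header_dict : List (String × String)) : Decidable (Pre_dict_to_iterable_py header_dict) := by unfold Pre_dict_to_iterable_py; infer_instance
def pvWitness_dict_to_iterable_py : (List (String × String)) :=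
  [(":method", "GET"), ("accept", "*/*"), (":path", "/")]
def Spec_dict_to_iterable_py (header_dict : List (String × String)) (out : List (String × String)) : Prop := out = dict_to_iterable_py_alt header_dict
instance (header_dict : List (String × String)) (out : List (String × String)) : Decidable (Spec_dict_to_iterable_py header_dict out) := by unfold Spec_dict_to_iterable_py; infer_instance

-- ===== CLAIM (what is proved, stated in full; the proofs are below) =====
def Claim_equal_dict_to_iterable_py : Prop := ∀ (header_dict : List (String × String)), Dom_dict_to_iterable_py header_dict → Pre_dict_to_iterable_py header_dict → Spec_dict_to_iterable_py header_dict (dict_to_iterable_py header_dict)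

-- ===== LEMMAS AND PROOFS =====

-- Inserting an element whose boolean key is `true` (a special) into a partitioned list
-- F ++ T (F all special, T all non-special) puts it right after F.
theorem insertBy_partition {α : Type} (p : α → Bool) (x : α) (F T : List α)
    (hF : ∀ y ∈ F, p y = true) (hT : ∀ y ∈ T, p y = false) (hx : p x = true) :
    PySem.List.insertBy (fun a b => decide ((!p a) < (!p b))) x (F ++ T) = F ++ x :: T := by
  induction F with
  | nil =>
    cases T with
    | nil => simp [PySem.List.insertBy]
    | cons t ts =>
      have ht : p t = false := hT t (by simp)
      simp [PySem.List.insertBy, hx, ht]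
  | cons f F ih =>
    have hf : p f = true := hF f (by simp)
    simp only [List.cons_append]
    rw [PySem.List.insertBy]
    simp [hx, hf, ih (fun y hy => hF y (by simp [hy]))]

-- The insertion-sort fold over a partitioned accumulator stays partitioned:
-- it appends specials to the first block and non-specials to the second.
theorem foldl_insertBy_partition {α : Type} (p : α → Bool) (xs F T : List α)
    (hF : ∀ y ∈ F, p y = true) (hT : ∀ y ∈ T, p y = false) :
    xs.foldl (fun acc x => PySem.List.insertBy (fun a b => decide ((!p a) < (!p b))) x acc)
        (F ++ T)
      = (F ++ xs.filter p) ++ (T ++ xs.filter (fun x => !p x)) := by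
  induction xs generalizing F T with
  | nil => simp
  | cons x xs ih =>
    simp only [List.foldl_cons]
    by_cases hx : p x = true
    · rw [insertBy_partition p x F T hF hT hx]
      have := ih (F ++ [x]) T
        (by intro y hy; rcases List.mem_append.mp hy with h | h
            · exact hF y h
            · simpa [List.mem_singleton.mp h]) hT
      simpa [List.filter_cons, hx] using this
    · have hx' : p x = false := by simpa using hx
      rw [PySem.List.insertBy_of_forall_not_before _ x (F ++ T)
        (by intro y hy; simp [hx'])]
      have := ih F (T ++ [x]) hF
        (by intro y hy; rcases List.mem_append.mp hy with h | h
            · exact hT y h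
            · simpa [List.mem_singleton.mp h])
      simpa [List.filter_cons, hx'] using this

-- A's stable sort on the boolean key `not special` IS the two-block partition.
theorem sorted_bool_key_eq_partition {α : Type} (p : α → Bool) (xs : List α) :
    PySem.List.sorted xs (fun x => !p x) false
      = xs.filter p ++ xs.filter (fun x => !p x) := by
  rw [PySem.List.sorted_eq_foldl_insertBy]
  simpa using foldl_insertBy_partition p xs [] [] (by simp) (by simp)

-- On a duplicate-free dict, pairing each stored key with its lookup gives back the pair.
theorem lookup_pair (hd : List (String × String)) (pr : String × String)
    (hn : (hd.map Prod.fst).Nodup) (hm : pr ∈ hd) :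
    (PySem.Dict.mk hd).getD pr.1 "" = pr.2 := by
  exact PySem.Dict.getD_of_mem_items (d := PySem.Dict.mk hd) (k := pr.1) (v := pr.2) (d0 := "")
    (by simpa using hm) (by simpa [PySem.Dict.keys] using hn)

-- ===== VERDICT (by name: the statement is the Claim_ definition above) =====
theorem dict_to_iterable_py_spec : Claim_equal_dict_to_iterable_py := by
  intro hd _ hpre
  show dict_to_iterable_py hd = dict_to_iterable_py_alt hd
  unfold dict_to_iterable_py dict_to_iterable_py_alt
  rw [sorted_bool_key_eq_partition (fun k => PySem.Str.startswith k ":") (hd.map Prod.fst)]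
  have hmap : ∀ q : (String × String) → Bool,
      ((hd.filter q).map Prod.fst).map (fun key => (key, (PySem.Dict.mk hd).getD key ""))
        = hd.filter q := by
    intro q
    rw [List.map_map]
    calc (hd.filter q).map ((fun key => (key, (PySem.Dict.mk hd).getD key "")) ∘ Prod.fst)
        = (hd.filter q).map id := by
          apply List.map_congr_left
          intro pr hpr
          simp [lookup_pair hd pr hpre (List.mem_of_mem_filter hpr)]
      _ = hd.filter q := List.map_id _
  rw [List.map_append, List.filter_map, List.filter_map, hmap, hmap]
  rfl
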